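-- pv_equiv track=rewrite | github.com/Dat-svg/Math | GK_CTRR/52200023.py | symbolic_forms
-- ===== SOURCE A (Python) =====
-- def symbolic_forms(abcd):
--     p = "it is windy"
--     q = "it is thundering"
--     r = "it is raining"
--     s = "it is lightning"
--
--     even_statements = ["a", "d", "f", "g"]
--     odd_statements = ["b", "c", "e", "g"]
--
--     if abcd % 2 == 0:
--         statements = even_statements
--     else:
--         statements = odd_statements
--
--     symbolic_forms = []
--
--     for statement in statements:
--         if statement == "a":
--             # It is windy but it isn't raining
--             symbolic_forms.append(f"{p} ∧ ~{r}")
--         elif statement == "b":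
--             # It is windy, thundering but it isn't raining
--             symbolic_forms.append(f"{p} ∧ {q} ∧ ~{r}")
--         elif statement == "c":
--             # It is raining without thundering and lightning
--             symbolic_forms.append(f"{r} ∧ ~{q} ∧ ~{s}")
--         elif statement == "d":
--             # Windiness is a necessary condition for rain
--             symbolic_forms.append(f"{p} → {r}")
--         elif statement == "e":
--             # Windiness is a sufficient condition for rain
--             symbolic_forms.append(f"{p} → {r}")
--         elif statement == "f":
--             # Whenever it is lightning, it will be thundering
--             symbolic_forms.append(f"{s} → {q}")
--         elif statement == "g":
--             # The necessary and sufficient condition for thundering is lightning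
--             symbolic_forms.append(f"{q} ↔ {s}")
--
--     return symbolic_forms
-- ===== SOURCE B (Python) =====
-- def symbolic_forms(abcd):
--     p = "it is windy"
--     q = "it is thundering"
--     r = "it is raining"
--     s = "it is lightning"
--     even_result = [f"{p} ∧ ~{r}", f"{p} → {r}", f"{s} → {q}", f"{q} ↔ {s}"]
--     odd_result = [f"{p} ∧ {q} ∧ ~{r}", f"{r} ∧ ~{q} ∧ ~{s}", f"{p} → {r}", f"{q} ↔ {s}"]
--     return even_result if abcd % 2 == 0 else odd_result
-- ===== Notes on version B (the rewrite author's own statement) =====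
-- stated objective: simpler
-- what changed: Replaced the loop over statement labels with its per-label dispatch by two precomputed constant lists selected directly on parity.
import Mathlib
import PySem

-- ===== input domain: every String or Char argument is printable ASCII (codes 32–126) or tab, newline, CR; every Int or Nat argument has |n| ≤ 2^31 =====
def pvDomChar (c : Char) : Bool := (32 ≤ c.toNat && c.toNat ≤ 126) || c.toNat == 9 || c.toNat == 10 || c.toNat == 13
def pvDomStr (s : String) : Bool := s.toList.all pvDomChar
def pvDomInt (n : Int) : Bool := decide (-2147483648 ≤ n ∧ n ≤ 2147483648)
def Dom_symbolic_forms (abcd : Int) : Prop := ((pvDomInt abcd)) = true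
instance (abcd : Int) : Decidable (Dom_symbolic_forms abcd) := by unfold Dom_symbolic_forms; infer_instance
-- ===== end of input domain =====

-- B replaces A's loop over statement labels and its per-label dispatch with two constant lists selected on parity (simpler).


-- ===== PORT A =====
def symbolic_forms (abcd : Int) : List String :=
  let p := "it is windy"
  let q := "it is thundering"
  let r := "it is raining"
  let s := "it is lightning"
  let even_statements := ["a", "d", "f", "g"]
  let odd_statements := ["b", "c", "e", "g"]
  let statements := if PySem.Int.mod abcd 2 = 0 then even_statements else odd_statements
  statements.foldl (fun acc statement =>
    if statement = "a" then acc ++ [p ++ " ∧ ~" ++ r]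
    else if statement = "b" then acc ++ [p ++ " ∧ " ++ q ++ " ∧ ~" ++ r]
    else if statement = "c" then acc ++ [r ++ " ∧ ~" ++ q ++ " ∧ ~" ++ s]
    else if statement = "d" then acc ++ [p ++ " → " ++ r]
    else if statement = "e" then acc ++ [p ++ " → " ++ r]
    else if statement = "f" then acc ++ [s ++ " → " ++ q]
    else if statement = "g" then acc ++ [q ++ " ↔ " ++ s]
    else acc) []

-- ===== PORT B =====
def symbolic_forms_alt (abcd : Int) : List String :=
  let p := "it is windy"
  let q := "it is thundering"
  let r := "it is raining"
  let s := "it is lightning"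
  let even_result := [p ++ " ∧ ~" ++ r, p ++ " → " ++ r, s ++ " → " ++ q, q ++ " ↔ " ++ s]
  let odd_result := [p ++ " ∧ " ++ q ++ " ∧ ~" ++ r, r ++ " ∧ ~" ++ q ++ " ∧ ~" ++ s,
                     p ++ " → " ++ r, q ++ " ↔ " ++ s]
  if PySem.Int.mod abcd 2 = 0 then even_result else odd_result

-- ===== PRECONDITION & SPEC =====
def Spec_symbolic_forms (abcd : Int) (out : List String) : Prop := out = symbolic_forms_alt abcd
instance (abcd : Int) (out : List String) : Decidable (Spec_symbolic_forms abcd out) := by unfold Spec_symbolic_forms; infer_instance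

-- ===== CLAIM (what is proved, stated in full; the proofs are below) =====
def Claim_equal_symbolic_forms : Prop := ∀ (abcd : Int), Dom_symbolic_forms abcd → Spec_symbolic_forms abcd (symbolic_forms abcd)

-- ===== LEMMAS AND PROOFS =====

-- ===== VERDICT (by name: the statement is the Claim_ definition above) =====
theorem symbolic_forms_spec : Claim_equal_symbolic_forms := by
  intro abcd _
  unfold Spec_symbolic_forms symbolic_forms symbolic_forms_alt
  by_cases h : (2:Int) ∣ abcd <;> simp [h, List.foldl]
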